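-- pv_equiv track=rewrite | github.com/River-Mochi/ZoneTools | Scripts/check_locales.py | extract_string_literals
-- ===== SOURCE A (Python) =====
-- from typing import Dict, List, Optional, Set, Tuple
--
-- def decode_csharp_string_literal(token: str) -> str:
--     """Decode one C# string literal into plain text."""
--     token = token.strip()
--
--     # Verbatim string: @"..."
--     if token.startswith('@"') and token.endswith('"'):
--         body = token[2:-1]
--         return body.replace('""', '"')
--
--     # Normal string: "..."
--     if token.startswith('"') and token.endswith('"'):
--         body = token[1:-1]
--         body = body.replace(r"\\", "\\").replace(r"\"", '"')
--         body = body.replace(r"\n", "\n").replace(r"\r", "\r").replace(r"\t", "\t")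
--         return body
--
--     return ""
--
-- def extract_string_literals(expr: str) -> str:
--     """
--     Concatenate all string literals found in an expression.
--
--     Example:
--         "Hello " + "World"
--     becomes:
--         "Hello World"
--
--     If the expression contains no string literals, returns "".
--     """
--     parts: List[str] = []
--     i = 0
--     n = len(expr)
--
--     while i < n:
--         ch = expr[i]
--
--         # Verbatim string: @"..."
--         if ch == "@" and i + 1 < n and expr[i + 1] == '"':
--             j = i + 2
--             while j < n:
--                 if expr[j] == '"' and j + 1 < n and expr[j + 1] == '"':
--                     j += 2
--                     continue
--                 if expr[j] == '"':
--                     parts.append(decode_csharp_string_literal(expr[i : j + 1]))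
--                     i = j + 1
--                     break
--                 j += 1
--             else:
--                 break
--             continue
--
--         # Normal string: "..."
--         if ch == '"':
--             j = i + 1
--             while j < n:
--                 if expr[j] == '"' and expr[j - 1] != "\\":
--                     parts.append(decode_csharp_string_literal(expr[i : j + 1]))
--                     i = j + 1
--                     break
--                 j += 1
--             else:
--                 break
--             continue
--
--         i += 1
--
--     return "".join(parts)
-- ===== SOURCE B (Python) =====
-- def decode_csharp_string_literal(token: str) -> str:
--     """Decode one C# string literal into plain text."""
--     token = token.strip()
--
--     # Verbatim string: @"..."
--     if token.startswith('@"') and token.endswith('"'):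
--         body = token[2:-1]
--         return body.replace('""', '"')
--
--     # Normal string: "..."
--     if token.startswith('"') and token.endswith('"'):
--         body = token[1:-1]
--         body = body.replace(r"\\", "\\").replace(r"\"", '"')
--         body = body.replace(r"\n", "\n").replace(r"\r", "\r").replace(r"\t", "\t")
--         return body
--
--     return ""
--
--
-- def extract_string_literals(expr: str) -> str:
--     """Flat single-pass state machine over the expression."""
--     OUTSIDE, IN_NORMAL, IN_VERBATIM = 0, 1, 2
--     n = len(expr)
--     out = []
--     state = OUTSIDE
--     start = 0
--     i = 0
--     while i < n:
--         ch = expr[i]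
--         if state == OUTSIDE:
--             if ch == "@" and i + 1 < n and expr[i + 1] == '"':
--                 state = IN_VERBATIM
--                 start = i
--                 i += 2
--                 continue
--             if ch == '"':
--                 state = IN_NORMAL
--                 start = i
--             i += 1
--         elif state == IN_NORMAL:
--             if ch == '"' and expr[i - 1] != "\\":
--                 out.append(decode_csharp_string_literal(expr[start:i + 1]))
--                 state = OUTSIDE
--             i += 1
--         else:  # IN_VERBATIM
--             if ch == '"':
--                 if i + 1 < n and expr[i + 1] == '"':
--                     i += 2
--                     continue
--                 out.append(decode_csharp_string_literal(expr[start:i + 1]))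
--                 state = OUTSIDE
--             i += 1
--     # an unclosed trailing literal is discarded, like A's break-on-exhaustion
--     return "".join(out)
-- ===== Notes on version B (the rewrite author's own statement) =====
-- stated objective: alternative
-- what changed: Replaced A's nested loops (outer scan with two inner closing-quote scans and while-else breaks) by one flat single-pass state machine with states OUTSIDE/IN_NORMAL/IN_VERBATIM and a recorded literal start index.
import Mathlib
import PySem

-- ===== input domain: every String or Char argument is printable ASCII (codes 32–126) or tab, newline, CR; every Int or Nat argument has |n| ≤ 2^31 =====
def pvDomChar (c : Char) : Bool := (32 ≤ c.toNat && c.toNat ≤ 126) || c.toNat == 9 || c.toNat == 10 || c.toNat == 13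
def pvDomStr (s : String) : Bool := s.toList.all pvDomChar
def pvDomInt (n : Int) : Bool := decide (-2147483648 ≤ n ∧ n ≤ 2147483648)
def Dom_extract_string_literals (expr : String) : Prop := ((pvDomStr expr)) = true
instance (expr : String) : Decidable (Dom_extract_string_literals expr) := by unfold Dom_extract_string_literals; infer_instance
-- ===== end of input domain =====

-- B replaces A's nested loops by one flat three-state scanner; same output, same O(n) cost.

-- shared helper: port of decode_csharp_string_literal (called by both Pythons)
def pvDecode (token : String) : String :=
  let token := PySem.Str.strip token
  if PySem.Str.startswith token "@\"" ∧ PySem.Str.endswith token "\"" then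
    let body := PySem.Str.slice token (some 2) (some (-1))
    PySem.Str.replace body "\"\"" "\""
  else if PySem.Str.startswith token "\"" ∧ PySem.Str.endswith token "\"" then
    let body := PySem.Str.slice token (some 1) (some (-1))
    let body := PySem.Str.replace (PySem.Str.replace body "\\\\" "\\") "\\\"" "\""
    PySem.Str.replace (PySem.Str.replace (PySem.Str.replace body "\\n" "\n") "\\r" "\r") "\\t" "\t"
  else ""

-- shared helper: expr[a:b] with 0 ≤ a ≤ b ≤ n (both Pythons slice only in-range)
def pvSlice (cs : List Char) (a b : Nat) : String := String.ofList ((cs.drop a).take (b - a))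

-- ===== PORT A =====
-- A's inner verbatim scan (`while j < n: …`); returns the closing-quote index, none = loop exhausted
def scanV (cs : List Char) (n j : Nat) : Option Nat :=
  if j < n then
    if cs.getD j ' ' = '"' ∧ j + 1 < n ∧ cs.getD (j+1) ' ' = '"' then scanV cs n (j+2)
    else if cs.getD j ' ' = '"' then some j
    else scanV cs n (j+1)
  else none
termination_by n - j

-- A's inner normal scan
def scanN (cs : List Char) (n j : Nat) : Option Nat :=
  if j < n then
    if cs.getD j ' ' = '"' ∧ cs.getD (j-1) ' ' ≠ '\\' then some j
    else scanN cs n (j+1)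
  else none
termination_by n - j

theorem scanV_le {cs : List Char} {n j e : Nat} (h : scanV cs n j = some e) : j ≤ e := by
  fun_induction scanV cs n j with
  | case1 j hj hq ih => exact le_trans (by omega) (ih h)
  | case2 j hj hq hc => simp at h; omega
  | case3 j hj hq hc ih => exact le_trans (by omega) (ih h)
  | case4 j hj => simp at h

theorem scanN_le {cs : List Char} {n j e : Nat} (h : scanN cs n j = some e) : j ≤ e := by
  fun_induction scanN cs n j with
  | case1 j hj hc => simp at h; omega
  | case2 j hj hc ih => exact le_trans (by omega) (ih h)
  | case3 j hj => simp at h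

-- A's outer `while i < n` loop
def outerA (cs : List Char) (n i : Nat) (parts : List String) : List String :=
  if _h : i < n then
    if cs.getD i ' ' = '@' ∧ i + 1 < n ∧ cs.getD (i+1) ' ' = '"' then
      match hv : scanV cs n (i+2) with
      | some j => outerA cs n (j+1) (parts ++ [pvDecode (pvSlice cs i (j+1))])
      | none => parts                    -- while-else: break out of the outer loop
    else if cs.getD i ' ' = '"' then
      match hn : scanN cs n (i+1) with
      | some j => outerA cs n (j+1) (parts ++ [pvDecode (pvSlice cs i (j+1))])
      | none => parts
    else outerA cs n (i+1) parts
  else parts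
termination_by n - i
decreasing_by
  · have := scanV_le hv; omega
  · have := scanN_le hn; omega
  · omega

def extract_string_literals (expr : String) : String :=
  String.join (outerA expr.toList expr.toList.length 0 [])

-- ===== PORT B =====
-- B's single flat loop; state: 0 = OUTSIDE, 1 = IN_NORMAL, 2 = IN_VERBATIM
def runB (cs : List Char) (n state start i : Nat) (out : List String) : List String :=
  if _h : i < n then
    if state = 0 then
      if cs.getD i ' ' = '@' ∧ i + 1 < n ∧ cs.getD (i+1) ' ' = '"' then runB cs n 2 i (i+2) out
      else if cs.getD i ' ' = '"' then runB cs n 1 i (i+1) out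
      else runB cs n 0 start (i+1) out
    else if state = 1 then
      if cs.getD i ' ' = '"' ∧ cs.getD (i-1) ' ' ≠ '\\' then
        runB cs n 0 start (i+1) (out ++ [pvDecode (pvSlice cs start (i+1))])
      else runB cs n 1 start (i+1) out
    else
      if cs.getD i ' ' = '"' then
        if i + 1 < n ∧ cs.getD (i+1) ' ' = '"' then runB cs n 2 start (i+2) out
        else runB cs n 0 start (i+1) (out ++ [pvDecode (pvSlice cs start (i+1))])
      else runB cs n 2 start (i+1) out
  else out   -- an unclosed trailing literal is discarded
termination_by n - i

def extract_string_literals_alt (expr : String) : String :=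
  String.join (runB expr.toList expr.toList.length 0 0 0 [])

-- ===== PRECONDITION & SPEC =====
def Spec_extract_string_literals (expr : String) (out : String) : Prop := out = extract_string_literals_alt expr
instance (expr : String) (out : String) : Decidable (Spec_extract_string_literals expr out) := by unfold Spec_extract_string_literals; infer_instance

-- ===== CLAIM (what is proved, stated in full; the proofs are below) =====
def Claim_equal_extract_string_literals : Prop := ∀ (expr : String), Dom_extract_string_literals expr → Spec_extract_string_literals expr (extract_string_literals expr)

-- ===== LEMMAS AND PROOFS =====

-- B in IN_NORMAL behaves like A's inner normal scan followed by the close action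
theorem runB_normal (cs : List Char) (n start : Nat) (j : Nat) (out : List String) :
    runB cs n 1 start j out =
      match scanN cs n j with
      | some e => runB cs n 0 start (e+1) (out ++ [pvDecode (pvSlice cs start (e+1))])
      | none => out := by
  fun_induction scanN cs n j with
  | case1 j hj hc =>
      rw [runB]
      simp only [List.getD_eq_getElem?_getD] at hc ⊢
      simp [hj, hc.1, hc.2]
  | case2 j hj hc ih =>
      rw [runB]
      simp only [List.getD_eq_getElem?_getD] at hc ⊢
      simp [hj, hc, ih]
  | case3 j hj =>
      rw [runB]; simp [hj]

-- B in IN_VERBATIM behaves like A's inner verbatim scan followed by the close action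
theorem runB_verbatim (cs : List Char) (n start : Nat) (j : Nat) (out : List String) :
    runB cs n 2 start j out =
      match scanV cs n j with
      | some e => runB cs n 0 start (e+1) (out ++ [pvDecode (pvSlice cs start (e+1))])
      | none => out := by
  fun_induction scanV cs n j with
  | case1 j hj hq ih =>
      rw [runB]
      simp only [List.getD_eq_getElem?_getD] at hq ⊢
      simp [hj, hq.1, hq.2.1, hq.2.2, ih]
  | case2 j hj hq hc =>
      rw [runB]
      have hq' : ¬ (j + 1 < n ∧ cs.getD (j+1) ' ' = '"') := fun h => hq ⟨hc, h⟩
      simp only [List.getD_eq_getElem?_getD] at hc hq' ⊢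
      simp [hj, hc, hq']
  | case3 j hj hq hc ih =>
      rw [runB]
      simp only [List.getD_eq_getElem?_getD] at hc ⊢
      simp [hj, hc, ih]
  | case4 j hj =>
      rw [runB]; simp [hj]

-- A's outer loop equals B's loop in state OUTSIDE (the start index is then irrelevant)
theorem outerA_eq_runB (cs : List Char) (n : Nat) (i : Nat) (parts : List String) :
    ∀ start, outerA cs n i parts = runB cs n 0 start i parts := by
  fun_induction outerA cs n i parts with
  | case1 i parts h hv j hj ih =>
      intro start
      rw [runB, runB_verbatim]
      simp only [List.getD_eq_getElem?_getD] at hv ⊢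
      simp [h, hv.1, hv.2.1, hv.2.2, hj]
      exact ih i
  | case2 i parts h hv hj =>
      intro start
      rw [runB, runB_verbatim]
      simp only [List.getD_eq_getElem?_getD] at hv ⊢
      simp [h, hv.1, hv.2.1, hv.2.2, hj]
  | case3 i parts h hv hq j hj ih =>
      intro start
      rw [runB, runB_normal]
      simp only [List.getD_eq_getElem?_getD] at hv hq ⊢
      simp [h, hv, hq, hj]
      exact ih i
  | case4 i parts h hv hq hj =>
      intro start
      rw [runB, runB_normal]
      simp only [List.getD_eq_getElem?_getD] at hv hq ⊢
      simp [h, hv, hq, hj]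
  | case5 i parts h hv hq ih =>
      intro start
      rw [runB]
      simp only [List.getD_eq_getElem?_getD] at hv hq ⊢
      simp [h, hv, hq]
      exact ih start
  | case6 i parts h =>
      intro start
      rw [runB]; simp [h]

-- ===== VERDICT (by name: the statement is the Claim_ definition above) =====
theorem extract_string_literals_spec : Claim_equal_extract_string_literals := by
  intro expr _
  unfold Spec_extract_string_literals extract_string_literals extract_string_literals_alt
  rw [outerA_eq_runB]
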